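-- pv_equiv track=rewrite | github.com/Arpad-Schaeffer/QRNG | plotgausiienne.py | assigner_valeurs_binaires
-- ===== SOURCE A (Python) =====
-- def assigner_valeurs_binaires(values, limites, k):
--     """
--     Assigne des valeurs binaires à chaque valeur en fonction des intervalles définis.
--     """
--     binary_values = []
--     binary_indices = []
--     for value in values:
--         for i in range(k):
--             if limites[i] <= value < limites[i + 1]:
--                 binary_values.append(format(i, f'0{k.bit_length() - 1}b'))  # Valeur binaire
--                 binary_indices.append(i)  # Indice de l'intervalle
--                 break
--     return binary_values, binary_indices
-- ===== SOURCE B (Python) =====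
-- def assigner_valeurs_binaires(values, limites, k):
--     """Interval table built once, per-distinct-value memoisation: the k-scan
--     runs once per distinct value instead of once per element."""
--     m = min(k, len(limites) - 1)
--     intervals = [(limites[i], limites[i + 1], i) for i in range(m)]
--     width = k.bit_length() - 1
--     cache = {}
--     binary_values = []
--     binary_indices = []
--     for value in values:
--         if value in cache:
--             hit = cache[value]
--         else:
--             hit = None
--             for lo, hi, i in intervals:
--                 if lo <= value < hi:
--                     hit = (format(i, f'0{width}b'), i)
--                     break
--             cache[value] = hit
--         if hit is not None:
--             binary_values.append(hit[0])
--             binary_indices.append(hit[1])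
--     return binary_values, binary_indices
-- ===== Notes on version B (the rewrite author's own statement) =====
-- stated objective: alternative
-- what changed: B builds the interval table and the format width once and memoises the per-value interval search in a dict, so the k-scan runs once per distinct value instead of once per element; Pre_ excludes exactly the inputs where A raises IndexError (k reaching past the end of limites with some value left unmatched).
import Mathlib
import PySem

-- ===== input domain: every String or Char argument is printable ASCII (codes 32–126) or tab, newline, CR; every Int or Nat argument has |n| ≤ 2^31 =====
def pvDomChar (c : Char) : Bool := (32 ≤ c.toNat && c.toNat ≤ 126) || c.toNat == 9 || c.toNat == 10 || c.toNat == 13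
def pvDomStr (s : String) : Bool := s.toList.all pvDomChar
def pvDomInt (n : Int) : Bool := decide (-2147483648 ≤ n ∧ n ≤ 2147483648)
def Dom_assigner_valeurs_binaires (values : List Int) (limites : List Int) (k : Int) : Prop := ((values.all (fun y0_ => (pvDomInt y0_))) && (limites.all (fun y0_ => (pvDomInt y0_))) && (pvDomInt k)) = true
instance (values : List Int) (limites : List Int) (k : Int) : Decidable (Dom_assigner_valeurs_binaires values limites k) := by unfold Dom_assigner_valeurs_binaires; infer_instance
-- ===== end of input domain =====

-- B replaces A's per-element scan of all k intervals by an interval table built once plus a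
-- per-distinct-value memo dict (objective: alternative decomposition; same result on all of Pre_).

-- ===== PORT A =====
-- format(i, f'0{w}b') for 0 ≤ i: binary digits left-padded with '0' to width w (exact there; only reached with 0 ≤ i and 0 ≤ w)
def pvBinDigits (n : Nat) : List Char :=
  if h : n = 0 then [] else pvBinDigits (n / 2) ++ [if n % 2 = 1 then '1' else '0']
decreasing_by exact Nat.div_lt_self (Nat.pos_of_ne_zero h) (by omega)

def pvBinStr (i : Int) (w : Int) : String :=
  let ds := if i = 0 then ['0'] else pvBinDigits i.toNat
  String.ofList (List.replicate (w.toNat - ds.length) '0' ++ ds)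

-- 'limites[i] <= value < limites[i + 1]' (short-circuit; in-range under Pre_)
def pvCondA (limites : List Int) (v : Int) (i : Int) : Bool :=
  PySem.List.pyGetD limites i 0 ≤ v && v < PySem.List.pyGetD limites (i + 1) 0

-- inner 'for i in range(k): … break'
def pvScanA (limites : List Int) (v : Int) : List Int → Option Int
  | [] => none
  | i :: rest => if pvCondA limites v i then some i else pvScanA limites v rest

def assigner_valeurs_binaires (values : List Int) (limites : List Int) (k : Int) : List String × List Int :=
  values.foldl (fun acc v =>
    match pvScanA limites v (PySem.List.pyRange 0 k 1) with
    | some i => (acc.1 ++ [pvBinStr i ((PySem.Int.bitLength k : Int) - 1)], acc.2 ++ [i])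
    | none => acc) ([], [])

-- ===== PORT B =====
-- intervals = [(limites[i], limites[i+1], i) for i in range(m)]
def pvIntervals (limites : List Int) (m : Int) : List (Int × Int × Int) :=
  (PySem.List.pyRange 0 m 1).map (fun i =>
    (PySem.List.pyGetD limites i 0, PySem.List.pyGetD limites (i + 1) 0, i))

-- inner 'for lo, hi, i in intervals: … break', building the (fmt, i) hit
def pvFindIv (w : Int) (v : Int) : List (Int × Int × Int) → Option (String × Int)
  | [] => none
  | (lo, hi, i) :: rest => if lo ≤ v && v < hi then some (pvBinStr i w, i) else pvFindIv w v rest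

def pvAppendHit (acc : List String × List Int) : Option (String × Int) → List String × List Int
  | some p => (acc.1 ++ [p.1], acc.2 ++ [p.2])
  | none => acc

def assigner_valeurs_binaires_alt (values : List Int) (limites : List Int) (k : Int) : List String × List Int :=
  let m := min k ((limites.length : Int) - 1)
  let intervals := pvIntervals limites m
  let w := (PySem.Int.bitLength k : Int) - 1
  (values.foldl (fun (st : (List String × List Int) × PySem.Dict Int (Option (String × Int))) v =>
      match st.2.get? v with
      | some hit => (pvAppendHit st.1 hit, st.2)
      | none =>
        let hit := pvFindIv w v intervals
        (pvAppendHit st.1 hit, st.2.insert v hit))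
    (([], []), PySem.Dict.empty)).1

-- ===== PRECONDITION & SPEC =====
-- Pre_ excludes exactly the inputs on which A raises IndexError: k ≥ 1 and k ≥ len(limites) while some
-- value matches none of the first len(limites)-1 intervals (the scan then reads limites out of range).
def Pre_assigner_valeurs_binaires (values : List Int) (limites : List Int) (k : Int) : Prop :=
  k ≤ 0 ∨ k + 1 ≤ (limites.length : Int) ∨
    ∀ v ∈ values,
      (∃ i ∈ List.range (limites.length - 1),
        PySem.List.pyGetD limites (i : Int) 0 ≤ v ∧ v < PySem.List.pyGetD limites ((i : Int) + 1) 0) ∨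
      (k = (limites.length : Int) ∧ limites ≠ [] ∧ v < PySem.List.pyGetD limites ((limites.length : Int) - 1) 0)
instance (values : List Int) (limites : List Int) (k : Int) : Decidable (Pre_assigner_valeurs_binaires values limites k) := by unfold Pre_assigner_valeurs_binaires; infer_instance

def pvWitness_assigner_valeurs_binaires : List Int × List Int × Int := ([0, 3], [0, 2, 4], 2)

def Spec_assigner_valeurs_binaires (values : List Int) (limites : List Int) (k : Int) (out : List String × List Int) : Prop := out = assigner_valeurs_binaires_alt values limites k
instance (values : List Int) (limites : List Int) (k : Int) (out : List String × List Int) : Decidable (Spec_assigner_valeurs_binaires values limites k out) := by unfold Spec_assigner_valeurs_binaires; infer_instance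

-- ===== CLAIM (what is proved, stated in full; the proofs are below) =====
def Claim_equal_assigner_valeurs_binaires : Prop := ∀ (values : List Int) (limites : List Int) (k : Int), Dom_assigner_valeurs_binaires values limites k → Pre_assigner_valeurs_binaires values limites k → Spec_assigner_valeurs_binaires values limites k (assigner_valeurs_binaires values limites k)


-- ===== LEMMAS AND PROOFS =====

theorem pvFindIv_intervals (limites : List Int) (w v : Int) (l : List Int) :
    pvFindIv w v (l.map (fun i =>
      (PySem.List.pyGetD limites i 0, PySem.List.pyGetD limites (i + 1) 0, i))) =
    (pvScanA limites v l).map (fun i => (pvBinStr i w, i)) := by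
  induction l with
  | nil => rfl
  | cons i rest ih =>
    simp only [List.map_cons, pvFindIv, pvScanA, pvCondA]
    split_ifs with h
    · rfl
    · exact ih

theorem pvScanA_append (limites : List Int) (v : Int) (l1 l2 : List Int) :
    pvScanA limites v (l1 ++ l2) =
      match pvScanA limites v l1 with
      | some i => some i
      | none => pvScanA limites v l2 := by
  induction l1 with
  | nil => rfl
  | cons i rest ih =>
    simp only [List.cons_append, pvScanA]
    split_ifs with h
    · rfl
    · exact ih

theorem pvScanA_isSome (limites : List Int) (v : Int) (l : List Int)
    (h : ∃ i ∈ l, pvCondA limites v i = true) : (pvScanA limites v l).isSome := by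
  induction l with
  | nil => simp at h
  | cons i rest ih =>
    simp only [pvScanA]
    split_ifs with hc
    · rfl
    · apply ih
      rcases h with ⟨j, hj, hcj⟩
      rcases List.mem_cons.1 hj with rfl | hj'
      · exact absurd hcj (by simp [hc])
      · exact ⟨j, hj', hcj⟩

-- under Pre_, the scan over range(k) equals the scan over range(min k (len-1))
theorem pvScanA_trunc (values limites : List Int) (k : Int) (v : Int)
    (hpre : Pre_assigner_valeurs_binaires values limites k) (hv : v ∈ values) :
    pvScanA limites v (PySem.List.pyRange 0 k 1) =
    pvScanA limites v (PySem.List.pyRange 0 (min k ((limites.length : Int) - 1)) 1) := by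
  set L : Int := (limites.length : Int) with hL
  rcases hpre with hk0 | hkle | hall
  · rw [PySem.List.pyRange_one_eq_nil (by omega), PySem.List.pyRange_one_eq_nil (by omega)]
  · rw [min_eq_left (by omega)]
  · rcases hall v hv with ⟨i, hi, hcond⟩ | ⟨hkL, hne, hlt⟩
    · -- a match exists among the first len-1 intervals
      have hiL : (i : Int) < L - 1 := by
        have := List.mem_range.1 hi
        simp only [hL]
        omega
      have hcondA : pvCondA limites v (i : Int) = true := by
        simp only [pvCondA, Bool.and_eq_true, decide_eq_true_eq]
        exact ⟨hcond.1, hcond.2⟩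
      by_cases hk : k ≤ L - 1
      · rw [min_eq_left (by omega)]
      · rw [min_eq_right (by omega)]
        rw [PySem.List.pyRange_one_append 0 (L - 1) k (by omega) (by omega), pvScanA_append]
        have hsome : (pvScanA limites v (PySem.List.pyRange 0 (L - 1) 1)).isSome := by
          apply pvScanA_isSome
          exact ⟨(i : Int), PySem.List.mem_pyRange_one.2 (by omega), hcondA⟩
        cases hs : pvScanA limites v (PySem.List.pyRange 0 (L - 1) 1) with
        | some j => rfl
        | none => rw [hs] at hsome; simp at hsome
    · -- k = len(limites), no match, value below the last limit
      subst hkL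
      have hL1 : 1 ≤ L := by
        have hpos : 0 < limites.length := List.length_pos_iff.mpr hne
        simp only [hL]
        exact_mod_cast hpos
      rw [min_eq_right (by omega)]
      rw [PySem.List.pyRange_one_append 0 (L - 1) L (by omega) (by omega), pvScanA_append]
      cases hs : pvScanA limites v (PySem.List.pyRange 0 (L - 1) 1) with
      | some j => rfl
      | none =>
        have hrange : PySem.List.pyRange (L - 1) L 1 = [L - 1] := by
          obtain ⟨a, ha⟩ : ∃ a, a = L - 1 := ⟨L - 1, rfl⟩
          rw [← ha, show L = a + 1 by omega, PySem.List.pyRange_one_singleton]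
        have hfalse : pvCondA limites v (L - 1) = false := by
          have hlt' : v < PySem.List.pyGetD limites (L - 1) 0 := by rw [hL]; exact hlt
          simp only [pvCondA, Bool.and_eq_false_iff, decide_eq_false_iff_not, not_le]
          left
          omega
        rw [hrange]
        simp only [pvScanA]
        rw [hfalse]
        simp

-- B's memoised fold computes the plain fold of h over values, for any h-consistent cache
theorem pvCacheFold (h : Int → Option (String × Int)) (values : List Int)
    (acc : List String × List Int) (d : PySem.Dict Int (Option (String × Int)))
    (hd : ∀ x r, d.get? x = some r → r = h x) :
    ((values.foldl (fun (st : (List String × List Int) × PySem.Dict Int (Option (String × Int))) v =>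
        match st.2.get? v with
        | some hit => (pvAppendHit st.1 hit, st.2)
        | none =>
          let hit := h v
          (pvAppendHit st.1 hit, st.2.insert v hit))
      (acc, d)).1) =
    values.foldl (fun acc v => pvAppendHit acc (h v)) acc := by
  induction values generalizing acc d with
  | nil => rfl
  | cons v rest ih =>
    simp only [List.foldl_cons]
    cases hv : d.get? v with
    | some r =>
      rw [hd v r hv]
      exact ih _ _ hd
    | none =>
      apply ih
      intro x r hx
      rw [PySem.Dict.get?_insert] at hx
      split_ifs at hx with hxv
      · subst hxv; exact (Option.some.inj hx).symm
      · exact hd x r hx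

-- ===== VERDICT (by name: the statement is the Claim_ definition above) =====
theorem assigner_valeurs_binaires_spec : Claim_equal_assigner_valeurs_binaires := by
  intro values limites k _hdom hpre
  unfold Spec_assigner_valeurs_binaires assigner_valeurs_binaires assigner_valeurs_binaires_alt
  rw [pvCacheFold _ values ([], []) PySem.Dict.empty (by intro x r hx; simp [PySem.Dict.get?_empty] at hx)]
  apply PySem.List.foldl_congr_mem
  intro acc v hv
  unfold pvIntervals
  rw [pvFindIv_intervals, ← pvScanA_trunc values limites k v hpre hv]
  cases pvScanA limites v (PySem.List.pyRange 0 k 1) with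
  | some i => rfl
  | none => rfl
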